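-- pv_equiv track=rewrite | github.com/Aayushmaan-shukla/scrapingscripts | enhanced_amazon_scraper.py | determine_offer_type
-- ===== SOURCE A (Python) =====
-- def determine_offer_type(card_title: str, description: str) -> str:
--     """Determine offer type based on card title and description."""
--     card_title_lower = card_title.lower() if card_title else ""
--     description_lower = description.lower() if description else ""
--
--     # Enhanced type detection
--     if any(keyword in card_title_lower for keyword in ['bank offer', 'instant discount', 'card offer']):
--         return "Bank Offer"
--     elif any(keyword in card_title_lower for keyword in ['no cost emi', 'no-cost emi', 'emi']):
--         return "No Cost EMI"
--     elif any(keyword in card_title_lower for keyword in ['cashback', 'cash back']):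
--         return "Cashback"
--     elif any(keyword in card_title_lower for keyword in ['partner offer', 'partner']):
--         return "Partner Offers"
--     elif any(keyword in description_lower for keyword in ['bank', 'credit card', 'debit card']):
--         return "Bank Offer"  # Fallback for bank-related offers
--     else:
--         return card_title if card_title else "Other Offer"
-- ===== SOURCE B (Python) =====
-- def determine_offer_type(card_title: str, description: str) -> str:
--     """Reverse-priority overwrite: start from the fallback, walk the rules from
--     lowest to highest priority overwriting on match (last write wins = first
--     match in original priority); keywords subsumed by a shorter substring are
--     dropped ('emi' occurs inside 'no cost emi'/'no-cost emi', 'partner' inside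
--     'partner offer')."""
--     title_lower = card_title.lower() if card_title else ""
--     desc_lower = description.lower() if description else ""
--     result = card_title if card_title else "Other Offer"
--     for haystack, keywords, label in [
--         (desc_lower, ("bank", "credit card", "debit card"), "Bank Offer"),
--         (title_lower, ("partner",), "Partner Offers"),
--         (title_lower, ("cashback", "cash back"), "Cashback"),
--         (title_lower, ("emi",), "No Cost EMI"),
--         (title_lower, ("bank offer", "instant discount", "card offer"), "Bank Offer"),
--     ]:
--         if any(keyword in haystack for keyword in keywords):
--             result = label
--     return result
-- ===== Notes on version B (the rewrite author's own statement) =====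
-- stated objective: alternative
-- what changed: Instead of an early-return if/elif chain, B starts from the fallback value and walks the rules in reverse priority order overwriting the result on every match (last write wins = first match), after dropping keywords subsumed by a shorter substring ('no cost emi'/'no-cost emi' reduced to 'emi', 'partner offer' to 'partner').
import Mathlib
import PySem

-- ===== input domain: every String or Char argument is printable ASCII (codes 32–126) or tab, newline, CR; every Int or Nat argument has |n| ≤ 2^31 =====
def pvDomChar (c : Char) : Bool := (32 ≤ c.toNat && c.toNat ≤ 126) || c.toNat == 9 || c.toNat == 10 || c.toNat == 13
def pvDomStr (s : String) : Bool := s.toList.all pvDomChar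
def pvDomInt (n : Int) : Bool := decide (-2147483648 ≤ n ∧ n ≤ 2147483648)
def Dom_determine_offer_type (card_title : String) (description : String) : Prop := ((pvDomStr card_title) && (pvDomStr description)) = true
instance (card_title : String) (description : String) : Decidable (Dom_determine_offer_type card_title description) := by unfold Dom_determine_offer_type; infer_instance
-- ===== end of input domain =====

-- B replaces the early-return if/elif chain by a reverse-priority overwrite loop over a
-- reduced rule table (subsumed keywords dropped); same cost, alternative structure.
-- ===== PORT A =====
def determine_offer_type (card_title : String) (description : String) : String :=
  let card_title_lower := if card_title ≠ "" then PySem.Str.lower card_title else ""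
  let description_lower := if description ≠ "" then PySem.Str.lower description else ""
  if ["bank offer", "instant discount", "card offer"].any (fun k => PySem.Str.isIn k card_title_lower) then "Bank Offer"
  else if ["no cost emi", "no-cost emi", "emi"].any (fun k => PySem.Str.isIn k card_title_lower) then "No Cost EMI"
  else if ["cashback", "cash back"].any (fun k => PySem.Str.isIn k card_title_lower) then "Cashback"
  else if ["partner offer", "partner"].any (fun k => PySem.Str.isIn k card_title_lower) then "Partner Offers"
  else if ["bank", "credit card", "debit card"].any (fun k => PySem.Str.isIn k description_lower) then "Bank Offer"
  else if card_title ≠ "" then card_title else "Other Offer"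

-- ===== PORT B =====
def determine_offer_type_alt (card_title : String) (description : String) : String :=
  let title_lower := if card_title ≠ "" then PySem.Str.lower card_title else ""
  let desc_lower := if description ≠ "" then PySem.Str.lower description else ""
  let init := if card_title ≠ "" then card_title else "Other Offer"
  [(desc_lower, (["bank", "credit card", "debit card"], "Bank Offer")),
   (title_lower, (["partner"], "Partner Offers")),
   (title_lower, (["cashback", "cash back"], "Cashback")),
   (title_lower, (["emi"], "No Cost EMI")),
   (title_lower, (["bank offer", "instant discount", "card offer"], "Bank Offer"))].foldl
    (fun result r =>
      if r.2.1.any (fun keyword => PySem.Str.isIn keyword r.1) then r.2.2 else result) init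

-- ===== PRECONDITION & SPEC =====
def Spec_determine_offer_type (card_title : String) (description : String) (out : String) : Prop := out = determine_offer_type_alt card_title description
instance (card_title : String) (description : String) (out : String) : Decidable (Spec_determine_offer_type card_title description out) := by unfold Spec_determine_offer_type; infer_instance

-- ===== CLAIM =====
def Claim_equal_determine_offer_type : Prop := ∀ (card_title : String) (description : String), Dom_determine_offer_type card_title description → Spec_determine_offer_type card_title description (determine_offer_type card_title description)

-- ===== LEMMAS AND PROOFS =====
theorem isIn_of_infix_isIn (a b s : String) (h : a.toList <:+: b.toList)
    (hb : PySem.Str.isIn b s = true) : PySem.Str.isIn a s = true := by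
  rw [PySem.Str.isIn_iff_infix] at hb ⊢
  exact h.trans hb

theorem emi_or (t : String) :
    (PySem.Str.isIn "no cost emi" t || (PySem.Str.isIn "no-cost emi" t || PySem.Str.isIn "emi" t))
      = PySem.Str.isIn "emi" t := by
  cases h : PySem.Str.isIn "emi" t with
  | true => simp only [Bool.or_true]
  | false =>
    have h1 : PySem.Str.isIn "no cost emi" t = false := by
      cases hc : PySem.Str.isIn "no cost emi" t with
      | false => rfl
      | true => rw [← h]; exact (isIn_of_infix_isIn "emi" "no cost emi" t (by decide) hc).symm
    have h2 : PySem.Str.isIn "no-cost emi" t = false := by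
      cases hc : PySem.Str.isIn "no-cost emi" t with
      | false => rfl
      | true => rw [← h]; exact (isIn_of_infix_isIn "emi" "no-cost emi" t (by decide) hc).symm
    rw [h1, h2]; rfl

theorem partner_or (t : String) :
    (PySem.Str.isIn "partner offer" t || PySem.Str.isIn "partner" t)
      = PySem.Str.isIn "partner" t := by
  cases h : PySem.Str.isIn "partner" t with
  | true => simp only [Bool.or_true]
  | false =>
    have h1 : PySem.Str.isIn "partner offer" t = false := by
      cases hc : PySem.Str.isIn "partner offer" t with
      | false => rfl
      | true => rw [← h]; exact (isIn_of_infix_isIn "partner" "partner offer" t (by decide) hc).symm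
    rw [h1]; rfl

-- ===== VERDICT =====
theorem determine_offer_type_spec : Claim_equal_determine_offer_type := by
  intro card_title description _
  unfold Spec_determine_offer_type determine_offer_type determine_offer_type_alt
  simp only [List.foldl, List.any_cons, List.any_nil, Bool.or_false, emi_or, partner_or]
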